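-- pv_equiv track=rewrite | github.com/Yaswanthh13426789155/SAP-AI | sap_agent.py | _build_validation_gate
-- ===== SOURCE A (Python) =====
-- def _append_unique(items, value, limit=None):
--     value = str(value or "").strip()
--     if not value:
--         return items
--     normalized_existing = {item.lower() for item in items}
--     if value.lower() in normalized_existing:
--         return items
--     items.append(value)
--     if limit:
--         return items[:limit]
--     return items
--
-- def _build_validation_gate(workspace, analysis_context, resolved_environment):
--     sections = workspace.get("sections") or {}
--     entities = (analysis_context or {}).get("entities", {})
--     lines = []
--
--     for item in (sections.get("Checks") or [])[:2]:
--         lines = _append_unique(lines, item, limit=5)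
--     for item in (sections.get("Required Inputs") or [])[:2]:
--         lines = _append_unique(lines, f"Confirm before change: {item}", limit=5)
--
--     if entities.get("transports"):
--         lines = _append_unique(lines, "Confirm transport sequence, prerequisite requests, and target-system activation state before importing again.", limit=5)
--     if entities.get("idocs") or entities.get("queues"):
--         lines = _append_unique(lines, "Confirm replay scope before reprocessing so duplicate payloads are not created.", limit=5)
--     if entities.get("users"):
--         lines = _append_unique(lines, "Limit authorization, role, or unlock changes to the affected user or technical account first.", limit=5)
--     if resolved_environment == "PROD":
--         lines = _append_unique(lines, "Capture rollback owner, approval path, and business validation contact before making a production change.", limit=5)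
--
--     return lines[:5]
-- ===== SOURCE B (Python) =====
-- def _build_validation_gate(workspace, analysis_context, resolved_environment):
--     sections = workspace.get("sections") or {}
--     entities = (analysis_context or {}).get("entities", {})
--
--     candidates = []
--     candidates.extend((sections.get("Checks") or [])[:2])
--     for item in (sections.get("Required Inputs") or [])[:2]:
--         candidates.append(f"Confirm before change: {item}")
--     if entities.get("transports"):
--         candidates.append("Confirm transport sequence, prerequisite requests, and target-system activation state before importing again.")
--     if entities.get("idocs") or entities.get("queues"):
--         candidates.append("Confirm replay scope before reprocessing so duplicate payloads are not created.")
--     if entities.get("users"):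
--         candidates.append("Limit authorization, role, or unlock changes to the affected user or technical account first.")
--     if resolved_environment == "PROD":
--         candidates.append("Capture rollback owner, approval path, and business validation contact before making a production change.")
--
--     result = []
--     seen = set()
--     for cand in candidates:
--         if len(result) == 5:
--             break
--         text = str(cand or "").strip()
--         if not text:
--             continue
--         key = text.lower()
--         if key in seen:
--             continue
--         seen.add(key)
--         result.append(text)
--     return result
-- ===== Notes on version B (the rewrite author's own statement) =====
-- stated objective: simpler
-- what changed: Separates candidate generation from filtering: builds the ordered candidate list first, then one dedup pass with a single persistent lowercase seen-set and an early stop at 5 items, replacing _append_unique's per-call set rebuild and append-then-truncate bookkeeping.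
import Mathlib
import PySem

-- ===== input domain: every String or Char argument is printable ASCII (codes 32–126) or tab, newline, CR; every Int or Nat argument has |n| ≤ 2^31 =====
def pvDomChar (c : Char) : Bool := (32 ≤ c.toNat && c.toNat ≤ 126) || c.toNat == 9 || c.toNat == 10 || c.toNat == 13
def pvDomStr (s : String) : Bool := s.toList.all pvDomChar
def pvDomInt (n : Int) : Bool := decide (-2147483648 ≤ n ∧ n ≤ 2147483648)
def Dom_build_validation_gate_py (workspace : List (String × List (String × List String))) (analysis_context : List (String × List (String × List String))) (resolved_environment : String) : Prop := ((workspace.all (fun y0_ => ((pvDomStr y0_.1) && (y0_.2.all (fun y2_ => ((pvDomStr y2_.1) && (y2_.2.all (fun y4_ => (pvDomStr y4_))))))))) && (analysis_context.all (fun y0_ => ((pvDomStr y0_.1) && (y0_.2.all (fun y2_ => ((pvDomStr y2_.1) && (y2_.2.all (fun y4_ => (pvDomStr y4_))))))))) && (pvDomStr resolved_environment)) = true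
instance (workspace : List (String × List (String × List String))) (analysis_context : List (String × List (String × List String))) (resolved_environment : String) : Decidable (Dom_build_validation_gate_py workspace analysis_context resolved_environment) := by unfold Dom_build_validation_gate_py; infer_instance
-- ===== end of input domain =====

-- B separates candidate generation from dedup: one ordered candidate list, then a single
-- filtering pass with one persistent lowercase seen-set and an early stop at 5 items (objective: simpler).


-- ===== PORT A =====
-- _append_unique(items, value, limit): 'str(value or "")' on a string argument is the string itself
-- ("" stays ""), so the port strips directly.
def pvAppendUnique (items : List String) (value : String) (limit : Option Int) : List String :=
  let value := PySem.Str.strip value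
  if value = "" then items
  else
    let normalized_existing : PySem.Set String := PySem.Set.ofList (items.map PySem.Str.lower)
    if PySem.Set.contains normalized_existing (PySem.Str.lower value) then items
    else
      let items := items ++ [value]
      match limit with
      | some l => if l ≠ 0 then PySem.List.slice items none (some l) else items
      | none => items

-- four message literals (shared by both Pythons verbatim)
def pvMsgTransports : String := "Confirm transport sequence, prerequisite requests, and target-system activation state before importing again."
def pvMsgIdocs : String := "Confirm replay scope before reprocessing so duplicate payloads are not created."
def pvMsgUsers : String := "Limit authorization, role, or unlock changes to the affected user or technical account first."
def pvMsgProd : String := "Capture rollback owner, approval path, and business validation contact before making a production change."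

-- entities.get(k) is truthy iff the key is present with a non-empty list
def pvTruthy (o : Option (List String)) : Bool :=
  match o with
  | some l => !l.isEmpty
  | none => false

def build_validation_gate_py (workspace : List (String × List (String × List String))) (analysis_context : List (String × List (String × List String))) (resolved_environment : String) : List String :=
  let sections := ((PySem.Dict.mk workspace).get? "sections").getD []
  let entities := (PySem.Dict.mk analysis_context).getD "entities" []
  let lines : List String := []
  let lines := (PySem.List.slice (((PySem.Dict.mk sections).get? "Checks").getD []) none (some 2)).foldl
    (fun lines item => pvAppendUnique lines item (some 5)) lines
  let lines := (PySem.List.slice (((PySem.Dict.mk sections).get? "Required Inputs").getD []) none (some 2)).foldl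
    (fun lines item => pvAppendUnique lines ("Confirm before change: " ++ item) (some 5)) lines
  let lines := if pvTruthy ((PySem.Dict.mk entities).get? "transports") then pvAppendUnique lines pvMsgTransports (some 5) else lines
  let lines := if pvTruthy ((PySem.Dict.mk entities).get? "idocs") || pvTruthy ((PySem.Dict.mk entities).get? "queues") then pvAppendUnique lines pvMsgIdocs (some 5) else lines
  let lines := if pvTruthy ((PySem.Dict.mk entities).get? "users") then pvAppendUnique lines pvMsgUsers (some 5) else lines
  let lines := if resolved_environment = "PROD" then pvAppendUnique lines pvMsgProd (some 5) else lines
  PySem.List.slice lines none (some 5)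

-- ===== PORT B =====
-- the dedup pass of Source B: one persistent lowercase seen-set, early stop at 5
def pvGateFilter : List String → List String → PySem.Set String → List String
  | [], result, _ => result
  | cand :: cands, result, seen =>
    if result.length = 5 then result
    else
      let text := PySem.Str.strip cand
      if text = "" then pvGateFilter cands result seen
      else
        let key := PySem.Str.lower text
        if PySem.Set.contains seen key then pvGateFilter cands result seen
        else pvGateFilter cands (result ++ [text]) (PySem.Set.add seen key)

def build_validation_gate_py_alt (workspace : List (String × List (String × List String))) (analysis_context : List (String × List (String × List String))) (resolved_environment : String) : List String :=
  let sections := ((PySem.Dict.mk workspace).get? "sections").getD []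
  let entities := (PySem.Dict.mk analysis_context).getD "entities" []
  let candidates : List String :=
    PySem.List.slice (((PySem.Dict.mk sections).get? "Checks").getD []) none (some 2)
    ++ (PySem.List.slice (((PySem.Dict.mk sections).get? "Required Inputs").getD []) none (some 2)).map
         (fun item => "Confirm before change: " ++ item)
    ++ (if pvTruthy ((PySem.Dict.mk entities).get? "transports") then [pvMsgTransports] else [])
    ++ (if pvTruthy ((PySem.Dict.mk entities).get? "idocs") || pvTruthy ((PySem.Dict.mk entities).get? "queues") then [pvMsgIdocs] else [])
    ++ (if pvTruthy ((PySem.Dict.mk entities).get? "users") then [pvMsgUsers] else [])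
    ++ (if resolved_environment = "PROD" then [pvMsgProd] else [])
  pvGateFilter candidates [] PySem.Set.empty

-- ===== PRECONDITION & SPEC =====
def Spec_build_validation_gate_py (workspace : List (String × List (String × List String))) (analysis_context : List (String × List (String × List String))) (resolved_environment : String) (out : List String) : Prop := out = build_validation_gate_py_alt workspace analysis_context resolved_environment
instance (workspace : List (String × List (String × List String))) (analysis_context : List (String × List (String × List String))) (resolved_environment : String) (out : List String) : Decidable (Spec_build_validation_gate_py workspace analysis_context resolved_environment out) := by unfold Spec_build_validation_gate_py; infer_instance

-- ===== CLAIM (what is proved, stated in full; the proofs are below) =====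
def Claim_equal_build_validation_gate_py : Prop := ∀ (workspace : List (String × List (String × List String))) (analysis_context : List (String × List (String × List String))) (resolved_environment : String), Dom_build_validation_gate_py workspace analysis_context resolved_environment → Spec_build_validation_gate_py workspace analysis_context resolved_environment (build_validation_gate_py workspace analysis_context resolved_environment)

-- ===== LEMMAS AND PROOFS =====

-- abbreviation for A's step
def pvStep (l : List String) (c : String) : List String := pvAppendUnique l c (some 5)

lemma pvStep_def (l : List String) (c : String) : pvStep l c = pvAppendUnique l c (some 5) := rfl

lemma pvStep_of_full (l : List String) (c : String) (h : l.length = 5) : pvStep l c = l := by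
  unfold pvStep pvAppendUnique
  simp only []
  split_ifs with h1 h2 h3
  · rfl
  · rfl
  · rw [PySem.List.slice_to _ (by norm_num)]
    show (l ++ [PySem.Str.strip c]).take (5:Int).toNat = l
    have : (5:Int).toNat = l.length := by omega
    rw [this, List.take_left]
  · exact absurd (by norm_num : (5:Int) ≠ 0) h3

lemma pvFoldl_of_full (cs : List String) (l : List String) (h : l.length = 5) :
    cs.foldl pvStep l = l := by
  induction cs with
  | nil => rfl
  | cons c cs ih =>
    rw [List.foldl_cons, pvStep_of_full l c h]
    exact ih

lemma pvSet_contains_iff {s : PySem.Set String} {x : String} :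
    PySem.Set.contains s x = true ↔ x ∈ s := by
  simp [PySem.Set.contains]

lemma pvGateFilter_eq_foldl (cs : List String) : ∀ (res : List String) (seen : PySem.Set String),
    res.length ≤ 5 →
    (∀ x, x ∈ seen ↔ x ∈ res.map PySem.Str.lower) →
    pvGateFilter cs res seen = cs.foldl pvStep res := by
  induction cs with
  | nil => intro res seen _ _; rfl
  | cons c cs ih =>
    intro res seen hlen hinv
    rw [List.foldl_cons]
    by_cases hfull : res.length = 5
    · rw [pvGateFilter, if_pos hfull, pvStep_of_full res c hfull, pvFoldl_of_full cs res hfull]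
    · have hlt : res.length < 5 := by omega
      rw [pvGateFilter, if_neg hfull]
      simp only []
      by_cases hemp : PySem.Str.strip c = ""
      · rw [if_pos hemp]
        have hstep : pvStep res c = res := by
          unfold pvStep pvAppendUnique; rw [if_pos hemp]
        rw [hstep]; exact ih res seen hlen hinv
      · rw [if_neg hemp]
        by_cases hseen : PySem.Set.contains seen (PySem.Str.lower (PySem.Str.strip c)) = true
        · rw [if_pos hseen]
          have hmem : PySem.Str.lower (PySem.Str.strip c) ∈ res.map PySem.Str.lower :=
            (hinv _).mp (pvSet_contains_iff.mp hseen)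
          have hstep : pvStep res c = res := by
            unfold pvStep pvAppendUnique
            rw [if_neg hemp, if_pos]
            exact pvSet_contains_iff.mpr ((PySem.Set.mem_ofList _ _).mpr hmem)
          rw [hstep]; exact ih res seen hlen hinv
        · rw [if_neg hseen]
          have hnotmem : PySem.Str.lower (PySem.Str.strip c) ∉ res.map PySem.Str.lower := by
            intro hm
            exact hseen (pvSet_contains_iff.mpr ((hinv _).mpr hm))
          have hstep : pvStep res c = res ++ [PySem.Str.strip c] := by
            unfold pvStep pvAppendUnique
            rw [if_neg hemp, if_neg]
            · simp only []
              rw [PySem.List.slice_to _ (by norm_num), if_pos (by norm_num)]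
              exact List.take_of_length_le (by simp; omega)
            · intro hcon
              exact hnotmem ((PySem.Set.mem_ofList _ _).mp (pvSet_contains_iff.mp hcon))
          rw [hstep]
          apply ih
          · simp; omega
          · intro x
            rw [PySem.Set.mem_add]
            simp only [List.map_append, List.map_cons, List.map_nil, List.mem_append,
              List.mem_cons, List.not_mem_nil, or_false]
            rw [hinv x]

lemma pvStep_length_le (l : List String) (c : String) (h : l.length ≤ 5) :
    (pvStep l c).length ≤ 5 := by
  unfold pvStep pvAppendUnique
  simp only []
  split_ifs with h1 h2 h3
  · exact h
  · exact h
  · rw [PySem.List.slice_to _ (by norm_num)]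
    simp
  · exact absurd (by norm_num : (5:Int) ≠ 0) h3

lemma pvFoldl_length_le (cs : List String) : ∀ (l : List String), l.length ≤ 5 →
    (cs.foldl pvStep l).length ≤ 5 := by
  induction cs with
  | nil => intro l h; exact h
  | cons c cs ih => intro l h; exact ih _ (pvStep_length_le l c h)

lemma pvFoldl_length_le' (f : String → String) (cs : List String) : ∀ (l : List String), l.length ≤ 5 →
    (cs.foldl (fun l x => pvStep l (f x)) l).length ≤ 5 := by
  induction cs with
  | nil => intro l h; exact h
  | cons c cs ih => intro l h; exact ih _ (pvStep_length_le l (f c) h)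

-- if cond then pvStep l m else l  =  foldl over the 0/1-candidate chunk
lemma pvIf_eq_foldl (l : List String) (m : String) (p : Prop) [Decidable p] :
    (if p then pvStep l m else l) = (if p then [m] else []).foldl pvStep l := by
  split_ifs <;> rfl

-- ===== VERDICT (by name: the statement is the Claim_ definition above) =====
set_option maxHeartbeats 1000000 in
theorem build_validation_gate_py_spec : Claim_equal_build_validation_gate_py := by
  unfold Claim_equal_build_validation_gate_py
  intro workspace analysis_context resolved_environment _
  unfold Spec_build_validation_gate_py build_validation_gate_py build_validation_gate_py_alt
  simp only [← pvStep_def]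
  rw [pvGateFilter_eq_foldl _ [] PySem.Set.empty (by simp) (by intro x; simp [PySem.Set.empty])]
  rw [pvIf_eq_foldl, pvIf_eq_foldl, pvIf_eq_foldl, pvIf_eq_foldl]
  rw [List.foldl_append, List.foldl_append, List.foldl_append, List.foldl_append, List.foldl_append]
  rw [List.foldl_map]
  rw [PySem.List.slice_to _ (by norm_num : (0:Int) ≤ 5)]
  apply List.take_of_length_le
  apply pvFoldl_length_le
  apply pvFoldl_length_le
  apply pvFoldl_length_le
  apply pvFoldl_length_le
  apply pvFoldl_length_le' (fun item => "Confirm before change: " ++ item)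
  apply pvFoldl_length_le' (fun item => item)
  simp
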